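-- pv_equiv track=rewrite | github.com/chorokKim/baekjoon | 프로그래머스/0/120837. 개미 군단/개미 군단.py | solution
-- ===== SOURCE A (Python) =====
-- def solution(hp):
--     answer = 0
--     while hp > 0:
--         if hp // 5 > 0:
--             answer += hp // 5
--             hp = hp % 5
--         elif hp // 3 > 0:
--             answer += hp // 3
--             hp = hp % 3
--         else:
--             answer += 1
--             hp -= 1
--     return answer
-- ===== SOURCE B (Python) =====
-- def solution(hp):
--     if hp <= 0:
--         return 0
--     answer = hp // 5
--     hp %= 5
--     return answer + hp // 3 + hp % 3
-- ===== Notes on version B (the rewrite author's own statement) =====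
-- stated objective: simpler
-- what changed: Replaced the while loop (which repeatedly subtracts 5, 3 or 1 from hp) by the closed-form greedy count hp//5 + (hp%5)//3 + (hp%5)%3 with a guard returning 0 for non-positive hp, matching the loop that never executes there.
import Mathlib
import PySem

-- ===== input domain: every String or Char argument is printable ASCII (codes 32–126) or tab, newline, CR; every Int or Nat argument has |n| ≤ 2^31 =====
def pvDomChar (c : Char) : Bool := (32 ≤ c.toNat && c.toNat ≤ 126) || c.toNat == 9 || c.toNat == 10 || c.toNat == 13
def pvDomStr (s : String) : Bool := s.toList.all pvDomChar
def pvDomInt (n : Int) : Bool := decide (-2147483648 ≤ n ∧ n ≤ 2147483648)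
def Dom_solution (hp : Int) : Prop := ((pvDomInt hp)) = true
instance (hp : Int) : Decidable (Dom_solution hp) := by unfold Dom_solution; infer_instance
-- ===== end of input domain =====

-- B replaces A's while loop by the closed-form greedy count hp//5 + (hp%5)//3 + (hp%5)%3 (0 for non-positive hp); objective: simpler.


-- ===== PORT A =====
-- the while loop of A: state (hp, answer)
def solutionLoop (hp answer : Int) : Int :=
  if h : hp > 0 then
    if h5 : PySem.Int.floordiv hp 5 > 0 then
      solutionLoop (PySem.Int.mod hp 5) (answer + PySem.Int.floordiv hp 5)
    else if h3 : PySem.Int.floordiv hp 3 > 0 then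
      solutionLoop (PySem.Int.mod hp 3) (answer + PySem.Int.floordiv hp 3)
    else
      solutionLoop (hp - 1) (answer + 1)
  else answer
termination_by hp.toNat
decreasing_by
  · rw [PySem.Int.mod_eq_emod_of_pos (by norm_num)]
    rw [PySem.Int.floordiv_eq_ediv_of_pos (by norm_num)] at h5
    omega
  · rw [PySem.Int.mod_eq_emod_of_pos (by norm_num)]
    rw [PySem.Int.floordiv_eq_ediv_of_pos (by norm_num)] at h3
    omega
  · omega

def solution (hp : Int) : Int := solutionLoop hp 0

-- ===== PORT B =====
def solution_alt (hp : Int) : Int :=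
  if hp ≤ 0 then 0
  else
    let answer := PySem.Int.floordiv hp 5
    let hp2 := PySem.Int.mod hp 5
    answer + PySem.Int.floordiv hp2 3 + PySem.Int.mod hp2 3

-- ===== PRECONDITION & SPEC =====
def Spec_solution (hp : Int) (out : Int) : Prop := out = solution_alt hp
instance (hp : Int) (out : Int) : Decidable (Spec_solution hp out) := by unfold Spec_solution; infer_instance

-- ===== CLAIM (what is proved, stated in full; the proofs are below) =====
def Claim_equal_solution : Prop := ∀ (hp : Int), Dom_solution hp → Spec_solution hp (solution hp)

-- ===== LEMMAS AND PROOFS =====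

-- closed form of A's loop for non-negative hp
theorem solutionLoop_eq (k : Nat) : ∀ (hp a : Int), 0 ≤ hp → hp.toNat = k →
    solutionLoop hp a = a + hp / 5 + (hp % 5) / 3 + (hp % 5) % 3 := by
  induction k using Nat.strong_induction_on with
  | _ k ih =>
    intro hp a hnn hk
    rw [solutionLoop]
    by_cases h : hp > 0
    · rw [dif_pos h]
      rw [PySem.Int.floordiv_eq_ediv_of_pos (b := 5) (by norm_num),
          PySem.Int.floordiv_eq_ediv_of_pos (b := 3) (by norm_num),
          PySem.Int.mod_eq_emod_of_pos (b := 5) (by norm_num),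
          PySem.Int.mod_eq_emod_of_pos (b := 3) (by norm_num)]
      by_cases h5 : hp / 5 > 0
      · rw [dif_pos h5]
        rw [ih (hp % 5).toNat (by omega) _ _ (by omega) rfl]
        omega
      · rw [dif_neg h5]
        by_cases h3 : hp / 3 > 0
        · rw [dif_pos h3]
          rw [ih (hp % 3).toNat (by omega) _ _ (by omega) rfl]
          have hlo : 3 ≤ hp := by omega
          have hhi : hp ≤ 4 := by omega
          interval_cases hp <;> omega
        · rw [dif_neg h3]
          rw [ih (hp - 1).toNat (by omega) _ _ (by omega) rfl]
          have hlo : 1 ≤ hp := by omega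
          have hhi : hp ≤ 2 := by omega
          interval_cases hp <;> omega
    · rw [dif_neg h]
      have : hp = 0 := by omega
      subst this
      norm_num

-- ===== VERDICT (by name: the statement is the Claim_ definition above) =====
theorem solution_spec : Claim_equal_solution := by
  intro hp _
  unfold Spec_solution solution solution_alt
  by_cases h : hp ≤ 0
  · rw [solutionLoop]
    simp [h, show ¬ hp > 0 by omega]
  · simp only [h, if_neg, not_false_iff]
    rw [solutionLoop_eq hp.toNat hp 0 (by omega) rfl]
    rw [PySem.Int.floordiv_eq_ediv_of_pos (b := 5) (by norm_num),
        PySem.Int.mod_eq_emod_of_pos (b := 5) (by norm_num),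
        PySem.Int.floordiv_eq_ediv_of_pos (b := 3) (by norm_num),
        PySem.Int.mod_eq_emod_of_pos (b := 3) (by norm_num)]
    omega
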